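-- pv_equiv track=rewrite | github.com/gagepaynee/delaneys-blog | blog/views.py | createBigSmall
-- ===== SOURCE A (Python) =====
-- def createBigSmall(length):
--     bigs = []
--     smalls = []
--
--     counter = 0
--     while counter < length:
--         bigs.append(counter)
--         if len(bigs) % 2 != 0:
--             counter += 6
--         else:
--             counter += 4
--
--     counter = 0
--     while counter < length:
--         if counter not in bigs:
--             smalls.append(counter)
--         counter += 1
--
--     return bigs, smalls
-- ===== SOURCE B (Python) =====
-- def createBigSmall(length):
--     bigs = []
--     smalls = []
--     counter = 0
--     while counter < length:
--         bigs.append(counter)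
--         nxt = counter + (6 if len(bigs) % 2 != 0 else 4)
--         smalls.extend(range(counter + 1, min(nxt, length)))
--         counter = nxt
--     return bigs, smalls
-- ===== Notes on version B (the rewrite author's own statement) =====
-- stated objective: faster
-- what changed: B generates bigs and smalls in one loop, emitting the gap range(counter+1, min(next, length)) between consecutive bigs, instead of A's second scan over [0,length) with an O(|bigs|) membership test per element.
import Mathlib
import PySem

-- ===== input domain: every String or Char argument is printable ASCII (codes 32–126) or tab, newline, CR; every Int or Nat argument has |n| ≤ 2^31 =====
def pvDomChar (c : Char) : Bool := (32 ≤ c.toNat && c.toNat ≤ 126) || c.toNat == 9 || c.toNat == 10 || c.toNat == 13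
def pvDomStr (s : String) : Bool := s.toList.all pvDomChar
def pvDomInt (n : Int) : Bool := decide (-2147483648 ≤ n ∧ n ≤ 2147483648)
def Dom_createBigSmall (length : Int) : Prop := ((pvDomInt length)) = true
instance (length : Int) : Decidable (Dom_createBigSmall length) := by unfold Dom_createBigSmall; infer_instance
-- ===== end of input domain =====

-- B builds bigs and smalls in a single pass (gap-filling); A rescans [0,length) with a membership test.

-- ===== PORT A =====
-- first while loop of A: append counter to bigs, step +6 when len(bigs) is odd else +4
def pvBigLoop (length : Int) (bigs : List Int) (counter : Int) : List Int :=
  if counter < length then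
    let bigs' := bigs ++ [counter]
    let counter' := if bigs'.length % 2 ≠ 0 then counter + 6 else counter + 4
    pvBigLoop length bigs' counter'
  else bigs
termination_by (length - counter).toNat
decreasing_by split <;> omega

-- second while loop of A: scan [0, length), append counters not in bigs
def pvSmallLoop (length : Int) (bigs : List Int) (smalls : List Int) (counter : Int) : List Int :=
  if counter < length then
    let smalls' := if counter ∉ bigs then smalls ++ [counter] else smalls
    pvSmallLoop length bigs smalls' (counter + 1)
  else smalls
termination_by (length - counter).toNat
decreasing_by omega

def createBigSmall (length : Int) : List Int × List Int :=
  let bigs := pvBigLoop length [] 0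
  let smalls := pvSmallLoop length bigs [] 0
  (bigs, smalls)

-- ===== PORT B =====
-- B's single loop: same big step, and the gap range(counter+1, min(nxt, length)) is appended to smalls
def pvAltLoop (length : Int) (bigs smalls : List Int) (counter : Int) : List Int × List Int :=
  if counter < length then
    let bigs' := bigs ++ [counter]
    let nxt := counter + (if bigs'.length % 2 ≠ 0 then 6 else 4)
    let smalls' := smalls ++ PySem.List.pyRange (counter + 1) (min nxt length) 1
    pvAltLoop length bigs' smalls' nxt
  else (bigs, smalls)
termination_by (length - counter).toNat
decreasing_by split <;> omega

def createBigSmall_alt (length : Int) : List Int × List Int :=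
  pvAltLoop length [] [] 0

-- ===== PRECONDITION & SPEC =====
def Spec_createBigSmall (length : Int) (out : List Int × List Int) : Prop := out = createBigSmall_alt length
instance (length : Int) (out : List Int × List Int) : Decidable (Spec_createBigSmall length out) := by unfold Spec_createBigSmall; infer_instance

-- ===== CLAIM (what is proved, stated in full; the proofs are below) =====
def Claim_equal_createBigSmall : Prop := ∀ (length : Int), Dom_createBigSmall length → Spec_createBigSmall length (createBigSmall length)

-- ===== LEMMAS AND PROOFS =====

-- the accumulator is a prefix of pvBigLoop's result
theorem pvBigLoop_prefix (length : Int) (bigs : List Int) (counter : Int) :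
    ∃ t, pvBigLoop length bigs counter = bigs ++ t := by
  fun_induction pvBigLoop length bigs counter with
  | case1 bigs counter h bigs' counter' ih =>
      obtain ⟨t, ht⟩ := ih
      exact ⟨counter :: t, by simpa [bigs'] using ht⟩
  | case2 => exact ⟨[], by simp⟩

-- every member of pvBigLoop's result is an old one or ≥ counter
theorem pvBigLoop_mem (length : Int) (bigs : List Int) (counter : Int) (x : Int)
    (hx : x ∈ pvBigLoop length bigs counter) : x ∈ bigs ∨ counter ≤ x := by
  fun_induction pvBigLoop length bigs counter with
  | case1 bigs counter h bigs' counter' ih =>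
      rcases ih hx with h1 | h1
      · rcases (show x ∈ bigs ∨ x = counter by simpa [bigs'] using h1) with h2 | h2
        · exact Or.inl h2
        · right; omega
      · right
        have h4 : counter + 4 ≤ counter' := by
          simp only [counter']; split <;> omega
        omega
  | case2 => exact Or.inl hx

-- A's second loop computes smalls ++ filter of [counter, length) by non-membership
theorem pvSmallLoop_eq (length : Int) (bigs smalls : List Int) (counter : Int) :
    pvSmallLoop length bigs smalls counter =
      smalls ++ (PySem.List.pyRange counter length 1).filter (fun x => decide (x ∉ bigs)) := by
  fun_induction pvSmallLoop length bigs smalls counter with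
  | case1 smalls counter h smalls' ih =>
      rw [ih, PySem.List.pyRange_one_cons h]
      by_cases hc : counter ∈ bigs <;> simp [smalls', hc]
  | case2 smalls counter h =>
      rw [PySem.List.pyRange_one_eq_nil (by omega)]; simp

-- B's loop returns A's bigs and A's filtered smalls, given that every accumulated big is ≤ counter
theorem pvAltLoop_eq (length : Int) (bigs smalls : List Int) (counter : Int)
    (hb : ∀ y ∈ bigs, y ≤ counter) :
    pvAltLoop length bigs smalls counter =
      (pvBigLoop length bigs counter,
       smalls ++ (PySem.List.pyRange counter length 1).filter
         (fun x => decide (x ∉ pvBigLoop length bigs counter))) := by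
  fun_induction pvAltLoop length bigs smalls counter with
  | case1 bigs smalls counter h bigs' nxt smalls' ih =>
      have hmono : counter + 1 ≤ nxt ∧ nxt ≤ counter + 6 := by
        simp only [nxt]; split <;> omega
      have hb' : ∀ y ∈ bigs', y ≤ nxt := by
        intro y hy
        rcases List.mem_append.1 hy with h1 | h1
        · have := hb y h1; omega
        · simp at h1; omega
      rw [ih hb']
      -- unfold one step of pvBigLoop on the left-hand side's target
      have hB : pvBigLoop length bigs counter = pvBigLoop length bigs' nxt := by
        rw [pvBigLoop, if_pos h]
        have harg : (if (bigs ++ [counter]).length % 2 ≠ 0 then counter + 6 else counter + 4) = nxt := by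
          simp only [bigs', nxt]; split <;> omega
        show pvBigLoop length (bigs ++ [counter])
            (if (bigs ++ [counter]).length % 2 ≠ 0 then counter + 6 else counter + 4) =
          pvBigLoop length bigs' nxt
        rw [harg]
      set B := pvBigLoop length bigs' nxt with hBdef
      -- counter is in B
      have hcB : counter ∈ B := by
        obtain ⟨t, ht⟩ := pvBigLoop_prefix length bigs' nxt
        rw [hBdef, ht]; simp [bigs']
      -- nothing strictly between counter and nxt is in B
      have hgap : ∀ x, counter < x → x < nxt → x ∉ B := by
        intro x h1 h2 hxB
        rcases pvBigLoop_mem length bigs' nxt x hxB with h3 | h3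
        · rcases List.mem_append.1 h3 with h4 | h4
          · have := hb x h4; omega
          · simp at h4; omega
        · omega
      rw [hB]
      refine Prod.ext rfl ?_
      simp only [smalls', List.append_assoc]
      congr 1
      -- split pyRange counter length at counter+1, filter out counter
      rw [PySem.List.pyRange_one_cons h]
      have hcf : (decide (counter ∉ B)) = false := by simp [hcB]
      simp only [List.filter_cons, hcf, Bool.false_eq_true, if_false]
      by_cases hnl : nxt ≤ length
      · have hmin : min nxt length = nxt := by omega
        rw [hmin, PySem.List.pyRange_one_append (counter + 1) nxt length (by omega) hnl,
            List.filter_append]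
        congr 1
        rw [eq_comm, List.filter_eq_self]
        intro x hx
        have := (PySem.List.mem_pyRange_one).1 hx
        simpa using hgap x (by omega) (by omega)
      · have hmin : min nxt length = length := by omega
        rw [hmin, PySem.List.pyRange_one_eq_nil (a := nxt) (by omega)]
        simp only [List.filter_nil, List.append_nil]
        rw [eq_comm, List.filter_eq_self]
        intro x hx
        have := (PySem.List.mem_pyRange_one).1 hx
        simpa using hgap x (by omega) (by omega)
  | case2 bigs smalls counter h =>
      rw [pvBigLoop, if_neg h, PySem.List.pyRange_one_eq_nil (by omega)]
      simp

-- ===== VERDICT (by name: the statement is the Claim_ definition above) =====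
theorem createBigSmall_spec : Claim_equal_createBigSmall := by
  intro length _
  unfold Spec_createBigSmall createBigSmall createBigSmall_alt
  show (pvBigLoop length [] 0, pvSmallLoop length (pvBigLoop length [] 0) [] 0) = _
  rw [pvAltLoop_eq length [] [] 0 (by simp), pvSmallLoop_eq]
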